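-- pv_equiv track=rewrite | github.com/Team-Atlanta/aixcc-asc-atlantis | crs/src/vapi/competition_api/wrapped_cp_workspace.py | delta_sequence
-- ===== SOURCE A (Python) =====
-- from typing import Iterator
--
-- def delta_sequence(limit: int) -> Iterator[int]:
--     """0, -1, 1, -2, 2, -3, 3, ... (OEIS A130472)"""
--     if limit <= 0: return
--
--     i = 0
--     yield i
--     limit -= 1
--     if limit == 0: return
--
--     while True:
--         i += 1
--
--         yield -i
--         limit -= 1
--         if limit == 0: return
--
--         yield i
--         limit -= 1
--         if limit == 0: return
-- ===== SOURCE B (Python) =====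
-- def delta_sequence(limit: int):
--     """0, -1, 1, -2, 2, -3, 3, ... (OEIS A130472), by a closed form per index."""
--     for k in range(limit):
--         m = (k + 1) // 2
--         yield -m if k % 2 else m
-- ===== Notes on version B (the rewrite author's own statement) =====
-- stated objective: simpler
-- what changed: Replaced the stateful generator (counter i, repeated limit-decrement and termination checks in an unrolled while-loop) by a single for-loop over range(limit) that computes each term by the closed form m=(k+1)//2, -m if k is odd else m.
import Mathlib
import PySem

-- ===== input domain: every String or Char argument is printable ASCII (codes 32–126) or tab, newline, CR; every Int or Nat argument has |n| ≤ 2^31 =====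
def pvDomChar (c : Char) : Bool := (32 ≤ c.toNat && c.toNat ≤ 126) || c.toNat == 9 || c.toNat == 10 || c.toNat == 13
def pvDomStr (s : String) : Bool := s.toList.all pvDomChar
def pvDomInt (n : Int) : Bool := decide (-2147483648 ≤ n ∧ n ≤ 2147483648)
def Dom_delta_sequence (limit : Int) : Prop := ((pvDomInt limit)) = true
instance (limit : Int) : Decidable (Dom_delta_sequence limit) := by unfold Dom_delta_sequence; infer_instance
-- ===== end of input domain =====

-- B replaces A's stateful yield/decrement machine by a single range(limit) loop with a
-- closed-form term per index (objective: simpler).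

-- ===== PORT A =====
-- the `while True` loop: `rem` is the remaining number of values still to yield
-- (Python's decremented `limit`); each iteration yields -i, checks, yields i, checks.
def dsLoop (i : Int) : Nat → List Int
  | 0 => []
  | 1 => [-i]
  | n + 2 => -i :: i :: dsLoop (i + 1) n

def delta_sequence (limit : Int) : List Int :=
  if limit ≤ 0 then [] else 0 :: dsLoop 1 (limit - 1).toNat

-- ===== PORT B =====
-- the loop body of Source B: m = (k+1)//2; -m if k % 2 else m
def dsTerm (k : Int) : Int :=
  let m := PySem.Int.floordiv (k + 1) 2
  if PySem.Int.mod k 2 ≠ 0 then -m else m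

def delta_sequence_alt (limit : Int) : List Int :=
  (PySem.List.pyRange 0 limit 1).map dsTerm

-- ===== PRECONDITION & SPEC =====
def Spec_delta_sequence (limit : Int) (out : List Int) : Prop := out = delta_sequence_alt limit
instance (limit : Int) (out : List Int) : Decidable (Spec_delta_sequence limit out) := by unfold Spec_delta_sequence; infer_instance

-- ===== CLAIM (what is proved, stated in full; the proofs are below) =====
def Claim_equal_delta_sequence : Prop := ∀ (limit : Int), Dom_delta_sequence limit → Spec_delta_sequence limit (delta_sequence limit)

-- ===== LEMMAS AND PROOFS =====

lemma dsTerm_odd (i : Int) : dsTerm (2 * i - 1) = -i := by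
  have h1 : PySem.Int.mod (2 * i - 1) 2 = (2 * i - 1) % 2 :=
    PySem.Int.mod_eq_emod_of_pos (by norm_num)
  have h2 : PySem.Int.floordiv (2 * i - 1 + 1) 2 = (2 * i - 1 + 1) / 2 :=
    PySem.Int.floordiv_eq_ediv_of_pos (by norm_num)
  have hmod : (2 * i - 1) % 2 = 1 := by omega
  have hdiv : (2 * i - 1 + 1) / 2 = i := by omega
  simp only [dsTerm, h1, hmod]
  norm_num [h2, hdiv]

lemma dsTerm_even (i : Int) : dsTerm (2 * i) = i := by
  have h1 : PySem.Int.mod (2 * i) 2 = (2 * i) % 2 :=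
    PySem.Int.mod_eq_emod_of_pos (by norm_num)
  have h2 : PySem.Int.floordiv (2 * i + 1) 2 = (2 * i + 1) / 2 :=
    PySem.Int.floordiv_eq_ediv_of_pos (by norm_num)
  have hmod : (2 * i) % 2 = 0 := by omega
  have hdiv : (2 * i + 1) / 2 = i := by omega
  simp only [dsTerm, h1, hmod]
  norm_num [h2, hdiv]

lemma dsLoop_eq (n : Nat) :
    ∀ i : Int, dsLoop i n = (PySem.List.pyRange (2 * i - 1) (2 * i - 1 + n) 1).map dsTerm := by
  induction n using Nat.strong_induction_on with
  | _ n ih =>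
    match n with
    | 0 =>
      intro i
      rw [PySem.List.pyRange_one_eq_nil (by omega)]
      simp [dsLoop]
    | 1 =>
      intro i
      have h : 2 * i - 1 + ((1 : Nat) : Int) = (2 * i - 1) + 1 := by push_cast; ring
      rw [h, PySem.List.pyRange_one_singleton]
      simp [dsLoop, dsTerm_odd]
    | n + 2 =>
      intro i
      have hrec := ih n (by omega) (i + 1)
      have hc1 : PySem.List.pyRange (2 * i - 1) (2 * i - 1 + ((n + 2 : Nat) : Int)) 1
          = (2 * i - 1) :: PySem.List.pyRange (2 * i) (2 * i - 1 + ((n + 2 : Nat) : Int)) 1 := by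
        rw [PySem.List.pyRange_one_cons (by push_cast; omega)]
        norm_num
      have hc2 : PySem.List.pyRange (2 * i) (2 * i - 1 + ((n + 2 : Nat) : Int)) 1
          = (2 * i) :: PySem.List.pyRange (2 * i + 1) (2 * i - 1 + ((n + 2 : Nat) : Int)) 1 := by
        rw [PySem.List.pyRange_one_cons (by push_cast; omega)]
      have hb : 2 * i - 1 + ((n + 2 : Nat) : Int) = 2 * (i + 1) - 1 + (n : Int) := by
        push_cast; ring
      have ha : (2 * i + 1 : Int) = 2 * (i + 1) - 1 := by ring
      show -i :: i :: dsLoop (i + 1) n = _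
      rw [hc1, hc2, List.map_cons, List.map_cons, dsTerm_odd i, dsTerm_even i, ha, hb, hrec]

theorem delta_sequence_spec : Claim_equal_delta_sequence := by
  intro limit _
  unfold Spec_delta_sequence delta_sequence delta_sequence_alt
  by_cases h : limit ≤ 0
  · rw [if_pos h, PySem.List.pyRange_one_eq_nil (by omega)]
    simp
  · rw [if_neg h, PySem.List.pyRange_one_cons (by omega : (0 : Int) < limit), List.map_cons]
    have h0 : dsTerm 0 = 0 := by
      have := dsTerm_even 0; norm_num at this; exact this
    have hl := dsLoop_eq (limit - 1).toNat 1
    have h1 : (2 * (1 : Int) - 1) = 1 := by norm_num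
    rw [h1] at hl
    have h2 : (1 : Int) + ((limit - 1).toNat : Int) = limit := by omega
    rw [h2] at hl
    rw [hl, h0]
    norm_num
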